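-- pv_equiv track=rewrite | github.com/LunaMoonax/Target-search | workflow_2/scripts/validate_primers_comprehensive.py | _calculate_hairpin
-- ===== SOURCE A (Python) =====
-- def _calculate_hairpin(seq):
--     max_score = 0
--     comp = {'A': 'T', 'T': 'A', 'G': 'C', 'C': 'G'}
--     for stem_len in range(4, 9):
--         for loop_len in range(3, 9):
--             for i in range(len(seq) - (2 * stem_len) - loop_len + 1):
--                 stem1 = seq[i : i + stem_len]
--                 stem2_rev = seq[i + stem_len + loop_len : i + 2 * stem_len + loop_len][::-1]
--                 matches = sum(1 for b1, b2 in zip(stem1, stem2_rev) if comp.get(b1) == b2)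
--                 if matches > 2: max_score = max(max_score, matches)
--     return max_score
-- ===== SOURCE B (Python) =====
-- def _calculate_hairpin(seq):
--     n = len(seq)
--     comp = {'A': 'T', 'T': 'A', 'G': 'C', 'C': 'G'}
--     best = 0
--     # loop position a = start of the loop region; expand the stem outward incrementally
--     for a in range(n + 1):
--         for loop_len in range(3, 9):
--             count = 0
--             for k in range(1, 9):
--                 lo = a - k
--                 hi = a + loop_len - 1 + k
--                 if lo < 0 or hi >= n:
--                     break
--                 if comp.get(seq[lo]) == seq[hi]:
--                     count += 1
--                 if k >= 4 and count > 2: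
--                     best = max(best, count)
--     return best
-- ===== Notes on version B (the rewrite author's own statement) =====
-- stated objective: faster
-- what changed: Instead of re-slicing, reversing and zip-counting the two stems for every (stem_len, loop_len, i), B fixes the loop position and expands the stem outward one base pair at a time, reusing the running complementary-pair count across all stem lengths and dropping all list slicing/reversal.
import Mathlib
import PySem

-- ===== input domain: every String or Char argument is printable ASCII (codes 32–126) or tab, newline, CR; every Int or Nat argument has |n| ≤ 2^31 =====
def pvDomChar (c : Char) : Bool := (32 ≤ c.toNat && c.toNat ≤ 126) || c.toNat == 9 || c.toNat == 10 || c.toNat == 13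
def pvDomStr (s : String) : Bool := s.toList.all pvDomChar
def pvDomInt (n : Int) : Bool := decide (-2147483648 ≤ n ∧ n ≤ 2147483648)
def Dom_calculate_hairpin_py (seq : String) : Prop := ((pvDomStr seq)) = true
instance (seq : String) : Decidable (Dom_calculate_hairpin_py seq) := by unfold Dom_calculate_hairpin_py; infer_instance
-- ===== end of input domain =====

-- B replaces per-stem slicing/zip-counting by an incremental outward expansion of the stem
-- around each loop position, reusing the running complementary-pair count (measured faster by a constant factor).


-- ===== PORT A =====
-- comp = {'A': 'T', 'T': 'A', 'G': 'C', 'C': 'G'}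
def hpComp : PySem.Dict Char Char := PySem.Dict.ofList [('A','T'),('T','A'),('G','C'),('C','G')]

-- literal transliteration of A: triple loop, slice both stems, reverse the second ([::-1] = reverse),
-- count complementary pairs over the zip, keep the max if > 2
def calculate_hairpin_py (seq : String) : Int :=
  let cs := seq.toList
  (PySem.List.pyRange 4 9 1).foldl (fun m1 stem_len =>
    (PySem.List.pyRange 3 9 1).foldl (fun m2 loop_len =>
      (PySem.List.pyRange 0 ((cs.length : Int) - 2 * stem_len - loop_len + 1) 1).foldl (fun m3 i =>
        let stem1 := PySem.List.slice cs (some i) (some (i + stem_len))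
        let stem2_rev := (PySem.List.slice cs (some (i + stem_len + loop_len)) (some (i + 2 * stem_len + loop_len))).reverse
        let nmatches : Int := ((stem1.zip stem2_rev).countP (fun bb => hpComp.get? bb.1 == some bb.2) : Nat)
        if nmatches > 2 then max m3 nmatches else m3) m2) m1) 0

-- ===== PORT B =====
-- inner 'for k in range(1, 9)' loop of Source B with its break (fuel = remaining iterations);
-- state: running count of complementary pairs, current best
def hpGo (cs : List Char) (n a l : Int) : Nat → Int → Int → Int → Int
  | 0, _, _, best => best
  | fuel+1, k, count, best =>
    let lo := a - k
    let hi := a + l - 1 + k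
    if lo < 0 ∨ n ≤ hi then best
    else
      -- comp.get(seq[lo]) == seq[hi]; both indices are in range under the guard
      let hit := match PySem.List.pyGet? cs lo, PySem.List.pyGet? cs hi with
        | some b1, some b2 => hpComp.get? b1 == some b2
        | _, _ => false
      let count' := if hit then count + 1 else count
      let best' := if 4 ≤ k ∧ count' > 2 then max best count' else best
      hpGo cs n a l fuel (k+1) count' best'

def calculate_hairpin_py_alt (seq : String) : Int :=
  let cs := seq.toList
  let n : Int := cs.length
  (PySem.List.pyRange 0 (n + 1) 1).foldl (fun best a =>
    (PySem.List.pyRange 3 9 1).foldl (fun best l =>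
      hpGo cs n a l 8 1 0 best) best) 0

-- ===== PRECONDITION & SPEC =====
def Spec_calculate_hairpin_py (seq : String) (out : Int) : Prop := out = calculate_hairpin_py_alt seq
instance (seq : String) (out : Int) : Decidable (Spec_calculate_hairpin_py seq out) := by unfold Spec_calculate_hairpin_py; infer_instance

-- ===== CLAIM (what is proved, stated in full; the proofs are below) =====
def Claim_equal_calculate_hairpin_py : Prop := ∀ (seq : String), Dom_calculate_hairpin_py seq → Spec_calculate_hairpin_py seq (calculate_hairpin_py seq)

-- ===== LEMMAS AND PROOFS =====

-- common specification of the complementary-pair count of a stem configuration: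
-- loop starts at position a, loop length l, stem length k; pairs (a-j, a+l-1+j) for j = 1..k
def hpMatch (cs : List Char) (lo hi : Nat) : Bool :=
  hpComp.get? (cs.getD lo ' ') == some (cs.getD hi ' ')

def hpC (cs : List Char) (a l k : Nat) : Nat :=
  (List.range' 1 k).countP (fun j => hpMatch cs (a - j) (a + l - 1 + j))

-- the value a stem configuration contributes to the running max (0 if it does not pass the > 2 test)
def hpG (cs : List Char) (a l k : Nat) : Int :=
  if 2 < hpC cs a l k then (hpC cs a l k : Int) else 0

-- list of values emitted by Source B's inner k-loop starting at k with 'fuel' iterations left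
def hpEmit (cs : List Char) (a l : Nat) : Nat → Nat → List Int
  | _, 0 => []
  | k, fuel+1 =>
    if k ≤ a ∧ a + l + k ≤ cs.length then
      (if 4 ≤ k ∧ 2 < hpC cs a l k then ((hpC cs a l k : Int)) else 0) :: hpEmit cs a l (k+1) fuel
    else []

def supL (xs : List Int) : Int := xs.foldl max 0

theorem le_foldl_max (xs : List Int) (b : Int) : b ≤ xs.foldl max b := by
  induction xs generalizing b with
  | nil => simp
  | cons x xs ih => exact le_trans (le_max_left b x) (ih (max b x))

theorem supL_nonneg (xs : List Int) : 0 ≤ supL xs := le_foldl_max xs 0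

theorem le_supL_of_mem {x : Int} {xs : List Int} (h : x ∈ xs) : x ≤ supL xs := by
  have aux : ∀ (xs : List Int) (b : Int), x ∈ xs → x ≤ xs.foldl max b := by
    intro xs
    induction xs with
    | nil => intro b h; simp at h
    | cons y ys ih =>
      intro b h
      rcases List.mem_cons.1 h with h | h
      · subst h; exact le_trans (le_max_right b x) (le_foldl_max ys _)
      · exact ih _ h
  exact aux xs 0 h

theorem supL_le {xs : List Int} {c : Int} (hc : 0 ≤ c) (h : ∀ x ∈ xs, x ≤ c) : supL xs ≤ c := by
  have aux : ∀ (xs : List Int) (b : Int), b ≤ c → (∀ x ∈ xs, x ≤ c) → xs.foldl max b ≤ c := by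
    intro xs
    induction xs with
    | nil => intro b hb _; simpa using hb
    | cons y ys ih =>
      intro b hb h
      exact ih _ (max_le hb (h y (List.mem_cons_self))) (fun x hx => h x (List.mem_cons_of_mem _ hx))
  exact aux xs 0 hc h

theorem supL_eq_of_mem {xs ys : List Int}
    (h1 : ∀ x ∈ xs, x ≤ supL ys) (h2 : ∀ y ∈ ys, y ≤ supL xs) : supL xs = supL ys := by
  exact le_antisymm (supL_le (supL_nonneg ys) h1) (supL_le (supL_nonneg xs) h2)

-- fold-shape lemmas
theorem foldl_if_max {α : Type} (v : α → Int) (xs : List α) (b : Int) (hb : 0 ≤ b) :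
    xs.foldl (fun m x => if 2 < v x then max m (v x) else m) b
      = (xs.map (fun x => if 2 < v x then v x else 0)).foldl max b := by
  induction xs generalizing b with
  | nil => rfl
  | cons x xs ih =>
    simp only [List.foldl_cons, List.map_cons]
    by_cases h : 2 < v x
    · simp only [if_pos h]
      exact ih _ (le_trans hb (le_max_left _ _))
    · simp only [if_neg h]
      rw [max_eq_left hb]
      exact ih _ hb

theorem foldl_congr_inv {α : Type} (P : Int → Prop) (f g : Int → α → Int) (xs : List α) (b : Int)
    (h1 : ∀ b x, x ∈ xs → P b → f b x = g b x) (h2 : ∀ b x, P b → P (g b x)) (hb : P b) :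
    xs.foldl f b = xs.foldl g b := by
  induction xs generalizing b with
  | nil => rfl
  | cons x xs ih =>
    simp only [List.foldl_cons]
    rw [h1 b x List.mem_cons_self hb]
    exact ih _ (fun b y hy hb' => h1 b y (List.mem_cons_of_mem _ hy) hb') (h2 b x hb)

theorem foldl_max_flatMap {α : Type} (W : α → List Int) (xs : List α) (b : Int) :
    xs.foldl (fun m x => (W x).foldl max m) b = (xs.flatMap W).foldl max b := by
  induction xs generalizing b with
  | nil => rfl
  | cons x xs ih =>
    simp only [List.foldl_cons, List.flatMap_cons, List.foldl_append]
    exact ih _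


theorem zip_countP_eq {α : Type} (p : α × α → Bool) (d : α) :
    ∀ (u v : List α), (u.zip v).countP p
      = (List.range (min u.length v.length)).countP (fun j => p (u.getD j d, v.getD j d)) := by
  intro u
  induction u with
  | nil => intro v; simp
  | cons x u ih =>
    intro v
    cases v with
    | nil => simp
    | cons y v =>
      simp only [List.zip_cons_cons, List.countP_cons, List.length_cons,
        Nat.succ_min_succ, List.range_succ_eq_map, List.countP_map]
      simp only [Function.comp_def, List.getD_cons_zero, List.getD_cons_succ]
      rw [ih v]

theorem mapRev (s : Nat) : (List.range' 1 s).map (fun k => s - k) = (List.range s).reverse := by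
  apply List.ext_getElem
  · simp
  · intro j h1 h2
    simp only [List.getElem_map, List.getElem_range', List.getElem_reverse,
      List.length_range, List.getElem_range]
    simp only [List.length_map, List.length_range'] at h1
    omega

theorem matches_eq_hpC (cs : List Char) (s l i : Nat) (h : i + 2*s + l ≤ cs.length) :
    ((PySem.List.slice cs (some (i:Int)) (some ((i:Int) + (s:Int)))).zip
      ((PySem.List.slice cs (some ((i:Int)+(s:Int)+(l:Int))) (some ((i:Int)+2*(s:Int)+(l:Int)))).reverse)).countP
        (fun bb => hpComp.get? bb.1 == some bb.2)
    = hpC cs (i+s) l s := by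
  have c1 : (i:Int)+(s:Int)+(l:Int) = ((i+s+l : Nat) : Int) := by push_cast; ring
  have c2 : (i:Int)+2*(s:Int)+(l:Int) = ((i+s+l : Nat) : Int) + ((s : Nat) : Int) := by push_cast; ring
  rw [PySem.List.slice_natCast_add, c1, c2, PySem.List.slice_natCast_add]
  have hu : ((cs.drop i).take s).length = s := by
    simp only [List.length_take, List.length_drop]; omega
  have hw : ((cs.drop (i+s+l)).take s).length = s := by
    simp only [List.length_take, List.length_drop]; omega
  rw [zip_countP_eq _ ' ', hu, List.length_reverse, hw, min_self]
  have step1 : ∀ j ∈ List.range s,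
      ((fun j => (hpComp.get? ((((cs.drop i).take s).getD j ' ', (((cs.drop (i+s+l)).take s).reverse).getD j ' ').1) == some ((((cs.drop i).take s).getD j ' ', (((cs.drop (i+s+l)).take s).reverse).getD j ' ').2))) j) = true
      ↔ ((fun j => hpMatch cs (i+j) (i+2*s+l-1-j)) j) = true := by
    intro j hj
    rw [List.mem_range] at hj
    have g1 : ((cs.drop i).take s).getD j ' ' = cs.getD (i+j) ' ' := by
      simp only [List.getD_eq_getElem?_getD, List.getElem?_take, if_pos hj, List.getElem?_drop]
    have g2 : (((cs.drop (i+s+l)).take s).reverse).getD j ' ' = cs.getD (i+2*s+l-1-j) ' ' := by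
      have hj' : j < ((cs.drop (i+s+l)).take s).length := by omega
      simp only [List.getD_eq_getElem?_getD, List.getElem?_reverse hj', hw]
      have hlt : s - 1 - j < s := by omega
      simp only [List.getElem?_take, if_pos hlt, List.getElem?_drop]
      have : i + s + l + (s - 1 - j) = i + 2*s + l - 1 - j := by omega
      rw [this]
    simp only [g1, g2, hpMatch]
  rw [List.countP_congr step1, hpC]
  rw [← List.countP_reverse, ← mapRev s, List.countP_map]
  apply List.countP_congr
  intro k hk
  have hk' : 1 ≤ k ∧ k < 1 + s := by
    have := List.mem_range'.1 hk
    omega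
  simp only [Function.comp_def]
  have e1 : i + (s - k) = i + s - k := by omega
  have e2 : i + 2*s + l - 1 - (s - k) = i + s + l - 1 + k := by omega
  rw [e1, e2]


theorem hpC_succ (cs : List Char) (a l m : Nat) :
    hpC cs a l (m+1) = hpC cs a l m + (if hpMatch cs (a-(m+1)) (a+l-1+(m+1)) then 1 else 0) := by
  unfold hpC
  rw [List.range'_concat, List.countP_append]
  simp only [List.countP_cons, List.countP_nil]
  have e : 1 + m = m + 1 := by ring
  simp [e]

theorem hpGo_spec (cs : List Char) (a l : Nat) :
    ∀ (fuel k : Nat) (best : Int), 1 ≤ k → 0 ≤ best →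
    hpGo cs (cs.length : Int) (a : Int) (l : Int) fuel (k : Int) ((hpC cs a l (k-1) : Nat) : Int) best
      = (hpEmit cs a l k fuel).foldl max best := by
  intro fuel
  induction fuel with
  | zero => intro k best _ _; simp [hpGo, hpEmit]
  | succ fuel ih =>
    intro k best hk hb
    rw [hpGo, hpEmit]
    by_cases hv : k ≤ a ∧ a + l + k ≤ cs.length
    · rw [if_neg (by omega), if_pos hv]
      have hlo : (a : Int) - (k : Int) = ((a - k : Nat) : Int) := by omega
      have hhi : (a : Int) + (l : Int) - 1 + (k : Int) = ((a + l - 1 + k : Nat) : Int) := by omega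
      have hlo' : a - k < cs.length := by omega
      have hhi' : a + l - 1 + k < cs.length := by omega
      rw [hlo, hhi, PySem.List.pyGet?_natCast, PySem.List.pyGet?_natCast,
        List.getElem?_eq_getElem hlo', List.getElem?_eq_getElem hhi']
      have hit_eq : (hpComp.get? cs[a - k] == some cs[a + l - 1 + k])
          = hpMatch cs (a - k) (a + l - 1 + k) := by
        unfold hpMatch
        rw [List.getD_eq_getElem?_getD, List.getD_eq_getElem?_getD,
          List.getElem?_eq_getElem hlo', List.getElem?_eq_getElem hhi']
        rfl
      simp only [hit_eq]
      have hcount : (if hpMatch cs (a - k) (a + l - 1 + k) then ((hpC cs a l (k-1) : Nat) : Int) + 1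
            else ((hpC cs a l (k-1) : Nat) : Int)) = ((hpC cs a l k : Nat) : Int) := by
        have hk1 : k - 1 + 1 = k := by omega
        rw [← hk1, hpC_succ cs a l (k-1), hk1]
        split_ifs with h <;> push_cast <;> ring
      rw [hcount]
      have hbest : (if 4 ≤ (k : Int) ∧ ((hpC cs a l k : Nat) : Int) > 2
            then max best ((hpC cs a l k : Nat) : Int) else best)
          = max best (if 4 ≤ k ∧ 2 < hpC cs a l k then ((hpC cs a l k : Nat) : Int) else 0) := by
        by_cases h : 4 ≤ k ∧ 2 < hpC cs a l k
        · have h' : 4 ≤ (k:Int) ∧ ((hpC cs a l k : Nat) : Int) > 2 :=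
            ⟨by exact_mod_cast h.1, by exact_mod_cast h.2⟩
          rw [if_pos h', if_pos h]
        · rw [if_neg (by intro hc; exact h ⟨by exact_mod_cast hc.1, by exact_mod_cast hc.2⟩), if_neg h,
            max_eq_left hb]
      rw [hbest]
      have hkk : (k : Int) + 1 = ((k + 1 : Nat) : Int) := by push_cast; ring
      have hck : hpC cs a l k = hpC cs a l ((k+1)-1) := by norm_num
      rw [List.foldl_cons, hkk, hck]
      exact ih (k+1) _ (by omega) (le_max_of_le_left hb)
    · rw [if_pos (by omega), if_neg hv]
      rfl

theorem hpEmit_mem_sub (cs : List Char) (a l : Nat) :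
    ∀ (fuel k : Nat) (x : Int), x ∈ hpEmit cs a l k fuel →
      ∃ k', k ≤ k' ∧ k' < k + fuel ∧ k' ≤ a ∧ a + l + k' ≤ cs.length ∧
        x = (if 4 ≤ k' ∧ 2 < hpC cs a l k' then ((hpC cs a l k' : Nat) : Int) else 0) := by
  intro fuel
  induction fuel with
  | zero => intro k x hx; simp [hpEmit] at hx
  | succ fuel ih =>
    intro k x hx
    rw [hpEmit] at hx
    by_cases hv : k ≤ a ∧ a + l + k ≤ cs.length
    · rw [if_pos hv] at hx
      rcases List.mem_cons.1 hx with h | h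
      · exact ⟨k, le_refl k, by omega, hv.1, hv.2, h⟩
      · obtain ⟨k', h1, h2, h3, h4, h5⟩ := ih (k+1) x h
        exact ⟨k', by omega, by omega, h3, h4, h5⟩
    · rw [if_neg hv] at hx; simp at hx
  
theorem hpEmit_mem_of (cs : List Char) (a l : Nat) :
    ∀ (fuel k k' : Nat), k ≤ k' → k' < k + fuel → k' ≤ a → a + l + k' ≤ cs.length →
      (if 4 ≤ k' ∧ 2 < hpC cs a l k' then ((hpC cs a l k' : Nat) : Int) else 0) ∈ hpEmit cs a l k fuel := by
  intro fuel
  induction fuel with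
  | zero => intro k k' h1 h2 _ _; omega
  | succ fuel ih =>
    intro k k' h1 h2 h3 h4
    rw [hpEmit, if_pos (by omega)]
    rcases Nat.eq_or_lt_of_le h1 with h | h
    · subst h; exact List.mem_cons_self
    · exact List.mem_cons_of_mem _ (ih (k+1) k' (by omega) (by omega) h3 h4)


-- the port-A value of one (stem_len, loop_len, i) configuration
def vA (cs : List Char) (s l i : Int) : Int :=
  (((PySem.List.slice cs (some i) (some (i + s))).zip
    ((PySem.List.slice cs (some (i + s + l)) (some (i + 2*s + l))).reverse)).countP
      (fun bb => hpComp.get? bb.1 == some bb.2) : Nat)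

theorem vA_eq (cs : List Char) (s l i : Nat) (h : i + 2*s + l ≤ cs.length) :
    vA cs (s : Int) (l : Int) (i : Int) = ((hpC cs (i+s) l s : Nat) : Int) := by
  unfold vA
  exact_mod_cast congrArg (fun n : Nat => (n : Int)) (matches_eq_hpC cs s l i h)

theorem A_eq (seq : String) :
    calculate_hairpin_py seq = supL ((PySem.List.pyRange 4 9 1).flatMap (fun s =>
      (PySem.List.pyRange 3 9 1).flatMap (fun l =>
        (PySem.List.pyRange 0 ((seq.toList.length : Int) - 2*s - l + 1) 1).map (fun i =>
          if 2 < vA seq.toList s l i then vA seq.toList s l i else 0)))) := by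
  unfold calculate_hairpin_py supL
  rw [← foldl_max_flatMap]
  apply foldl_congr_inv (fun b => 0 ≤ b)
  · intro b s _ hb
    rw [← foldl_max_flatMap]
    apply foldl_congr_inv (fun b => 0 ≤ b)
    · intro b' l _ hb'
      exact foldl_if_max (vA seq.toList s l) _ b' hb'
    · intro b' l hb'
      exact le_trans hb' (le_foldl_max _ _)
    · exact hb
  · intro b s hb
    exact le_trans hb (le_foldl_max _ _)
  · exact le_refl 0

theorem B_eq (seq : String) :
    calculate_hairpin_py_alt seq = supL ((PySem.List.pyRange 0 ((seq.toList.length : Int) + 1) 1).flatMap (fun a =>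
      (PySem.List.pyRange 3 9 1).flatMap (fun l => hpEmit seq.toList a.toNat l.toNat 1 8))) := by
  unfold calculate_hairpin_py_alt supL
  rw [← foldl_max_flatMap]
  apply foldl_congr_inv (fun b => 0 ≤ b)
  · intro b a ha hb
    rw [← foldl_max_flatMap]
    apply foldl_congr_inv (fun b => 0 ≤ b)
    · intro b' l hl hb'
      have ha' := PySem.List.mem_pyRange_one.1 ha
      have hl' := PySem.List.mem_pyRange_one.1 hl
      have e1 : ((a.toNat : Nat) : Int) = a := Int.toNat_of_nonneg ha'.1
      have e2 : ((l.toNat : Nat) : Int) = l := Int.toNat_of_nonneg (by omega)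
      have := hpGo_spec seq.toList a.toNat l.toNat 8 1 b' (le_refl 1) hb'
      rw [e1, e2] at this
      simpa [hpC] using this
    · intro b' l hb'
      exact le_trans hb' (le_foldl_max _ _)
    · exact hb
  · intro b a hb
    exact le_trans hb (le_foldl_max _ _)
  · exact le_refl 0

-- ===== VERDICT (by name: the statement is the Claim_ definition above) =====
theorem calculate_hairpin_py_spec : Claim_equal_calculate_hairpin_py := by
  intro seq _
  unfold Spec_calculate_hairpin_py
  rw [A_eq, B_eq]
  apply supL_eq_of_mem
  · intro x hx
    simp only [List.mem_flatMap, List.mem_map] at hx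
    obtain ⟨s, hs, l, hl, i, hi, hx⟩ := hx
    have hs' := PySem.List.mem_pyRange_one.1 hs
    have hl' := PySem.List.mem_pyRange_one.1 hl
    have hi' := PySem.List.mem_pyRange_one.1 hi
    have es : ((s.toNat : Nat) : Int) = s := Int.toNat_of_nonneg (by omega)
    have el : ((l.toNat : Nat) : Int) = l := Int.toNat_of_nonneg (by omega)
    have ei : ((i.toNat : Nat) : Int) = i := Int.toNat_of_nonneg (by omega)
    have hrange : i.toNat + 2 * s.toNat + l.toNat ≤ seq.toList.length := by omega
    rw [← es, ← el, ← ei, vA_eq seq.toList s.toNat l.toNat i.toNat hrange] at hx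
    apply le_supL_of_mem
    simp only [List.mem_flatMap]
    refine ⟨((i.toNat + s.toNat : Nat) : Int), PySem.List.mem_pyRange_one.2 ⟨by omega, by omega⟩,
      ((l.toNat : Nat) : Int), by rw [el]; exact hl, ?_⟩
    have hmem := hpEmit_mem_of seq.toList (i.toNat + s.toNat) l.toNat 8 1 s.toNat
      (by omega) (by omega) (by omega) (by omega)
    simp only [Int.toNat_natCast]
    rw [← hx]
    have heq : (if 4 ≤ s.toNat ∧ 2 < hpC seq.toList (i.toNat + s.toNat) l.toNat s.toNat
          then ((hpC seq.toList (i.toNat + s.toNat) l.toNat s.toNat : Nat) : Int) else 0)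
        = (if 2 < ((hpC seq.toList (i.toNat + s.toNat) l.toNat s.toNat : Nat) : Int)
          then ((hpC seq.toList (i.toNat + s.toNat) l.toNat s.toNat : Nat) : Int) else 0) := by
      by_cases hc : 2 < hpC seq.toList (i.toNat + s.toNat) l.toNat s.toNat
      · rw [if_pos ⟨by omega, hc⟩, if_pos (by exact_mod_cast hc)]
      · rw [if_neg (fun h => hc h.2), if_neg (by exact_mod_cast hc)]
    rw [← heq]
    exact hmem
  · intro y hy
    simp only [List.mem_flatMap] at hy
    obtain ⟨a, ha, l, hl, hy⟩ := hy
    have ha' := PySem.List.mem_pyRange_one.1 ha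
    have hl' := PySem.List.mem_pyRange_one.1 hl
    obtain ⟨k', hk1, hk2, hk3, hk4, hy⟩ := hpEmit_mem_sub seq.toList a.toNat l.toNat 8 1 y hy
    by_cases hc : 4 ≤ k' ∧ 2 < hpC seq.toList a.toNat l.toNat k'
    · rw [if_pos hc] at hy
      apply le_supL_of_mem
      simp only [List.mem_flatMap, List.mem_map]
      have ea : ((a.toNat : Nat) : Int) = a := Int.toNat_of_nonneg (by omega)
      have el : ((l.toNat : Nat) : Int) = l := Int.toNat_of_nonneg (by omega)
      refine ⟨((k' : Nat) : Int), PySem.List.mem_pyRange_one.2 ⟨by exact_mod_cast hc.1, by omega⟩,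
        ((l.toNat : Nat) : Int), by rw [el]; exact hl,
        ((a.toNat - k' : Nat) : Int), PySem.List.mem_pyRange_one.2 ⟨by omega, by omega⟩, ?_⟩
      have hrange : (a.toNat - k') + 2 * k' + l.toNat ≤ seq.toList.length := by omega
      rw [vA_eq seq.toList k' l.toNat (a.toNat - k') hrange]
      have ek : a.toNat - k' + k' = a.toNat := by omega
      rw [ek, hy, if_pos (by exact_mod_cast hc.2)]
    · rw [if_neg hc] at hy
      rw [hy]
      exact supL_nonneg _
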